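-- pv_equiv track=rewrite | github.com/KimBergstroem/gamers_insight-CRUD-Blog-App | django_compat.py | valid_boundary
-- ===== SOURCE A (Python) =====
-- def valid_boundary(boundary):
--     """Check if the boundary string is valid.
--
--     This is a replacement for the cgi.valid_boundary function that was removed in Python 3.11+
--     """
--     # Convert boundary to string if it's not already
--     if not isinstance(boundary, str):
--         try:
--             boundary = str(boundary)
--         except:
--             return False
--
--     # Per RFC 2046, section 5.1.1, the boundary may be any string
--     # that doesn't occur in the body, including the hyphens.
--     if not boundary:
--         return False
--
--     # Make sure the boundary is a valid MIME boundary
--     # The spec says the boundary should be 1-70 ASCII chars,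
--     # not ending with a space and not containing control chars
--     if len(boundary) > 70:
--         return False
--
--     for c in boundary:
--         # Make sure c is a single character string
--         if not isinstance(c, str) or len(c) != 1:
--             return False
--         char_code = ord(c)
--         if char_code < 32 or char_code > 126:
--             return False
--
--     if boundary.endswith(' '):
--         return False
--
--     return True
-- ===== SOURCE B (Python) =====
-- def valid_boundary(boundary):
--     """Validate a MIME boundary by one fused recursive scan:
--     budget counts the 70-char limit down, each char is checked printable,
--     and the no-trailing-space rule is decided at the last character."""
--     if not isinstance(boundary, str):
--         try:
--             boundary = str(boundary)
--         except:
--             return False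
--     return _scan(list(boundary), 70)
--
--
-- def _scan(chars, budget):
--     if not chars:
--         return False
--     if budget == 0:
--         return False
--     c = ord(chars[0])
--     if c < 32 or c > 126:
--         return False
--     if len(chars) == 1:
--         return c != 32
--     return _scan(chars[1:], budget - 1)
-- ===== Notes on version B (the rewrite author's own statement) =====
-- stated objective: alternative
-- what changed: Replaces A's staged guard chain (empty check, length check, per-character printable loop, endswith check) with one fused recursive scan that counts the 70-char budget down, rejects a non-printable char on sight, and decides the no-trailing-space rule at the last character.
import Mathlib
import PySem

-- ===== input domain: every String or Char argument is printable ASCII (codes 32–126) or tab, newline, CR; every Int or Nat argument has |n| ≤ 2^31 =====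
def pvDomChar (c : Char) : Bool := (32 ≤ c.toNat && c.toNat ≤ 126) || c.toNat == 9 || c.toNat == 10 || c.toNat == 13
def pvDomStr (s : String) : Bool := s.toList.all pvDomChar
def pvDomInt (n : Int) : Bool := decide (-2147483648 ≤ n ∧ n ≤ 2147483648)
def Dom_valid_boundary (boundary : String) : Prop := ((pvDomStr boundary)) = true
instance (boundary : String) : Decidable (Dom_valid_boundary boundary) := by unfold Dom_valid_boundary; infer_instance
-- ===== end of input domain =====

-- B fuses A's staged guards (empty, length > 70, per-char printable loop, endswith ' ')
-- into one recursive scan with a countdown budget; same cost, different decomposition.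
-- On String inputs the isinstance/str() branch of A never fires.

-- ===== PORT A =====
-- A's for-loop with its early `return False`; the `isinstance(c, str) and len(c) == 1`
-- test inside the loop is always true when iterating over a str, so it is ported away.
def pvLoopA : List Char → Bool
  | [] => true
  | c :: rest =>
      if c.toNat < 32 ∨ c.toNat > 126 then false else pvLoopA rest

def valid_boundary (boundary : String) : Bool :=
  if PySem.Str.len boundary == 0 then false
  else if PySem.Str.len boundary > 70 then false
  else if pvLoopA boundary.toList = false then false
  else if PySem.Str.endswith boundary " " then false
  else true

-- ===== PORT B =====
-- _scan(chars, budget): the fused recursive pass of Source B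
def pvScanB : List Char → Int → Bool
  | [], _ => false
  | c :: rest, budget =>
      if budget = 0 then false
      else if c.toNat < 32 ∨ c.toNat > 126 then false
      else if rest = [] then decide (c.toNat ≠ 32)
      else pvScanB rest (budget - 1)

def valid_boundary_alt (boundary : String) : Bool :=
  pvScanB boundary.toList 70

-- ===== PRECONDITION & SPEC =====
def Spec_valid_boundary (boundary : String) (out : Bool) : Prop := out = valid_boundary_alt boundary
instance (boundary : String) (out : Bool) : Decidable (Spec_valid_boundary boundary out) := by unfold Spec_valid_boundary; infer_instance

-- ===== CLAIM (what is proved, stated in full; the proofs are below) =====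
def Claim_equal_valid_boundary : Prop := ∀ (boundary : String), Dom_valid_boundary boundary → Spec_valid_boundary boundary (valid_boundary boundary)

-- ===== LEMMAS AND PROOFS =====

theorem pv_char_eq_space_iff (c : Char) : c = ' ' ↔ c.toNat = 32 := by
  constructor
  · rintro rfl; rfl
  · intro h
    have := congrArg Char.ofNat h
    rwa [Char.ofNat_toNat] at this

-- closed-form of B's scan for positive budgets
theorem pv_scanB_eq (l : List Char) (b : Int) (hb : 0 < b) :
    pvScanB l b =
      (!l.isEmpty && decide ((l.length : Int) ≤ b) && pvLoopA l
        && !(l.getLast? == some ' ')) := by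
  induction l generalizing b with
  | nil => simp [pvScanB]
  | cons c rest ih =>
      by_cases hbad : c.toNat < 32 ∨ c.toNat > 126
      · simp [pvScanB, hb.ne', hbad, pvLoopA]
      · cases rest with
        | nil =>
            have h1 : (1 : Int) ≤ b := hb
            simp [pvScanB, hb.ne', hbad, pvLoopA, h1]
            rw [Bool.eq_iff_iff]
            simp [pv_char_eq_space_iff]
        | cons d t =>
            by_cases hb1 : b = 1
            · subst hb1
              simp [pvScanB, hbad]
            · have hb' : 0 < b - 1 := by omega
              rw [show pvScanB (c :: d :: t) b = pvScanB (d :: t) (b - 1) by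
                simp [pvScanB, hb.ne', hbad]]
              rw [ih _ hb']
              simp [pvLoopA, hbad, List.getLast?_cons_cons]

theorem pv_endswith_space (l : List Char) :
    PySem.Chars.endswith l [' '] = (l.getLast? == some ' ') := by
  rw [Bool.eq_iff_iff, beq_iff_eq, PySem.Chars.endswith_iff, List.getLast?_eq_some_iff]
  constructor
  · rintro ⟨t, ht⟩; exact ⟨t, ht.symm⟩
  · rintro ⟨t, ht⟩; exact ⟨t, ht.symm⟩

-- ===== VERDICT (by name: the statement is the Claim_ definition above) =====
theorem valid_boundary_spec : Claim_equal_valid_boundary := by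
  unfold Claim_equal_valid_boundary
  intro boundary _
  unfold Spec_valid_boundary valid_boundary valid_boundary_alt
  rw [pv_scanB_eq _ 70 (by norm_num)]
  simp only [PySem.Str.len_eq, PySem.Str.endswith_eq,
    show (" " : String).toList = [' '] from by decide, pv_endswith_space]
  split_ifs with h0 h70 hloop hend <;> simp_all
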